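-- pv_equiv track=rewrite | github.com/thangquang09/HCMUS | Intro_AI/BTLT_TUAN1/homework3_8queens.py | hill_climbing_steepest_ascent
-- ===== SOURCE A (Python) =====
-- def compute_conflicts(state):
--     """
--     Tính tổng số xung đột trong trạng thái.
--
--     Xung đột xảy ra khi hai quân hậu tấn công lẫn nhau theo hàng, cột hoặc đường chéo.
--
--     Tham số:
--     - state (list): Danh sách vị trí các quân hậu trên bàn cờ.
--
--     Trả về:
--     - conflicts (int): Tổng số cặp quân hậu tấn công lẫn nhau.
--     """
--     n = len(state)
--     conflicts = 0
--     for col in range(n):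
--         for other_col in range(col + 1, n):
--             if state[col] == state[other_col] or \
--                abs(state[col] - state[other_col]) == abs(col - other_col):
--                 conflicts += 1
--     return conflicts
--
-- def get_successors(state):
--     """
--     Sinh tất cả các trạng thái lân cận bằng cách di chuyển một quân hậu trong cột của nó.
--
--     Mỗi trạng thái lân cận được tạo ra bằng cách di chuyển một quân hậu đến một hàng khác trong cùng cột.
--
--     Tham số:
--     - state (list): Danh sách vị trí các quân hậu trên bàn cờ.
--
--     Trả về:
--     - successors (list): Danh sách các trạng thái lân cận.
--     """
--     n = len(state)
--     successors = []
--     for col in range(n):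
--         for row in range(n):
--             if state[col] != row:
--                 new_state = state.copy()
--                 new_state[col] = row
--                 successors.append(new_state)
--     return successors
--
-- def hill_climbing_steepest_ascent(initial_state):
--     """
--     Thuật toán Leo đồi (Hill Climbing) dạng Steepest-Ascent để giải bài toán n-queens.
--
--     Cách hoạt động:
--     - Bắt đầu từ một trạng thái ban đầu.
--     - Tại mỗi bước, xem xét tất cả các trạng thái lân cận.
--     - Chọn trạng thái lân cận có số xung đột ít nhất (tốt nhất).
--     - Nếu trạng thái lân cận tốt nhất không cải thiện so với trạng thái hiện tại, dừng lại (mắc kẹt tại cực tiểu cục bộ).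
--     - Nếu tìm thấy trạng thái tốt hơn, chuyển sang trạng thái đó và lặp lại quá trình.
--     - Tiếp tục cho đến khi tìm được lời giải (số xung đột bằng 0) hoặc mắc kẹt.
--
--     Tham số:
--     - initial_state (list): Trạng thái ban đầu của bàn cờ n-queens.
--
--     Trả về:
--     - Tuple (result_state, search_cost):
--         - result_state (list): Trạng thái giải pháp nếu tìm thấy, hoặc None nếu không tìm thấy.
--         - search_cost (int): Chi phí tìm kiếm, tức là số lần đánh giá trạng thái.
--     """
--     current = initial_state
--     search_cost = 0
--     while True:
--         current_conflicts = compute_conflicts(current)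
--         search_cost += 1
--         if current_conflicts == 0:
--             return current, search_cost
--         successors = get_successors(current)
--         successor_conflicts = [(compute_conflicts(s), s) for s in successors]
--         search_cost += len(successors)
--         min_conflicts, best_successor = min(successor_conflicts, key=lambda x: x[0])
--         if min_conflicts >= current_conflicts:
--             return None, search_cost  # Mắc kẹt tại cực tiểu cục bộ
--         current = best_successor
-- ===== SOURCE B (Python) =====
-- def hill_climbing_steepest_ascent(initial_state):
--     """Steepest-ascent hill climbing for n-queens, evaluating each candidate move
--     incrementally in O(n) (delta of the current queen's attack degree) instead of
--     rescoring the whole board in O(n^2) per successor, and without materializing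
--     successor states."""
--     n = len(initial_state)
--     current = list(initial_state)
--     search_cost = 0
--
--     def deg(col, v):
--         # attacks between a queen placed at (col, v) and the queens in the other columns
--         t = 0
--         for j in range(n):
--             if j != col and (v == current[j] or abs(v - current[j]) == abs(col - j)):
--                 t += 1
--         return t
--
--     def total_conflicts():
--         c = 0
--         for col in range(n):
--             for other in range(col + 1, n):
--                 if current[col] == current[other] or \
--                    abs(current[col] - current[other]) == abs(col - other):
--                     c += 1
--         return c
--
--     while True:
--         cc = total_conflicts()
--         search_cost += 1
--         if cc == 0:
--             return current, search_cost
--         best = None  # (conflicts, col, row), first minimum in scan order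
--         moves = 0
--         for col in range(n):
--             base = cc - deg(col, current[col])
--             for row in range(n):
--                 if row != current[col]:
--                     moves += 1
--                     cand = base + deg(col, row)
--                     if best is None or cand < best[0]:
--                         best = (cand, col, row)
--         search_cost += moves
--         if best is None or best[0] >= cc:
--             return None, search_cost
--         current[best[1]] = best[2]
-- ===== Notes on version B (the rewrite author's own statement) =====
-- stated objective: faster
-- what changed: Each candidate move is scored incrementally as current_conflicts - deg(col, old_row) + deg(col, new_row) with an O(n) attack-degree scan, instead of rebuilding every successor state and rescoring it with the O(n^2) pairwise count; successor lists are never materialized and the first minimum is tracked during the scan. Intended as faster (O(n^3) vs O(n^4) per step); a timing run measured B 39.65x faster at n=64, the largest size at which A still finishes.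
import Mathlib
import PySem

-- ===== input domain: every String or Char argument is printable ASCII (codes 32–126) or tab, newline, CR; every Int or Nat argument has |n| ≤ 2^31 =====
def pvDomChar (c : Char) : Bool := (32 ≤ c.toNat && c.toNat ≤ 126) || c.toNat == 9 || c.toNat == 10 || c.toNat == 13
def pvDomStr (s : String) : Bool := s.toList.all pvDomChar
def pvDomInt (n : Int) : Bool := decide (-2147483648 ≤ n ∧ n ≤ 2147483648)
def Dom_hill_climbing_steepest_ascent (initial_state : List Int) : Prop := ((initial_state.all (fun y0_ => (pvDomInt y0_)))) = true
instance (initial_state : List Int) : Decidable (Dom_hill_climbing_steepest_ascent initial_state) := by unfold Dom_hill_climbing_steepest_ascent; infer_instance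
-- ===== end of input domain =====

-- B rescans the board once per candidate move (O(n) delta of the moved queen's attack degree)
-- instead of rebuilding and fully rescoring every successor (O(n^2) each); return values are identical.

-- ===== PORT A =====
def compute_conflicts (state : List Int) : Int :=
  let n : Int := state.length
  (PySem.List.pyRange 0 n).foldl (fun conflicts col =>
    (PySem.List.pyRange (col + 1) n).foldl (fun conflicts other_col =>
      if (PySem.List.pyGetD state col 0 == PySem.List.pyGetD state other_col 0 ||
          (PySem.List.pyGetD state col 0 - PySem.List.pyGetD state other_col 0).natAbs ==
            (col - other_col).natAbs)
      then conflicts + 1 else conflicts) conflicts) 0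

def get_successors (state : List Int) : List (List Int) :=
  let n : Int := state.length
  (PySem.List.pyRange 0 n).foldl (fun successors col =>
    (PySem.List.pyRange 0 n).foldl (fun successors row =>
      if (PySem.List.pyGetD state col 0 != row)
      then successors ++ [state.set col.toNat row] else successors) successors) []

def hca_go : Nat → List Int → Int → Option (List Int) × Int
  | 0, _, search_cost => (none, search_cost)  -- fuel guard, never reached (conflicts strictly decrease)
  | fuel + 1, current, search_cost =>
    let current_conflicts := compute_conflicts current
    let search_cost := search_cost + 1
    if current_conflicts = 0 then (some current, search_cost)
    else
      let successors := get_successors current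
      let successor_conflicts := successors.map (fun s => (compute_conflicts s, s))
      let search_cost := search_cost + successors.length
      match PySem.List.min? successor_conflicts (fun x => x.1) with
      | none => (none, search_cost)  -- empty-min guard, never reached when conflicts ≠ 0
      | some (min_conflicts, best_successor) =>
        if min_conflicts ≥ current_conflicts then (none, search_cost)
        else hca_go fuel best_successor search_cost

def hill_climbing_steepest_ascent (initial_state : List Int) : Option (List Int) × Int :=
  hca_go ((compute_conflicts initial_state).toNat + 1) initial_state 0

-- ===== PORT B =====
-- Source B's deg(col, v): attacks between a queen placed at (col, v) and the queens in the other columns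
def pv_deg (current : List Int) (col v : Int) : Int :=
  let n : Int := current.length
  (PySem.List.pyRange 0 n).foldl (fun t j =>
    if (j != col && (v == PySem.List.pyGetD current j 0 ||
        (v - PySem.List.pyGetD current j 0).natAbs == (col - j).natAbs))
    then t + 1 else t) 0

-- Source B's total_conflicts(): the plain pairwise count, computed once per step
def pv_total (state : List Int) : Int :=
  let n : Int := state.length
  (PySem.List.pyRange 0 n).foldl (fun conflicts col =>
    (PySem.List.pyRange (col + 1) n).foldl (fun conflicts other_col =>
      if (PySem.List.pyGetD state col 0 == PySem.List.pyGetD state other_col 0 ||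
          (PySem.List.pyGetD state col 0 - PySem.List.pyGetD state other_col 0).natAbs ==
            (col - other_col).natAbs)
      then conflicts + 1 else conflicts) conflicts) 0

def hcb_go : Nat → List Int → Int → Option (List Int) × Int
  | 0, _, search_cost => (none, search_cost)  -- fuel guard, never reached (conflicts strictly decrease)
  | fuel + 1, current, search_cost =>
    let n : Int := current.length
    let cc := pv_total current
    let search_cost := search_cost + 1
    if cc = 0 then (some current, search_cost)
    else
      let r := (PySem.List.pyRange 0 n).foldl (fun bm col =>
          let base := cc - pv_deg current col (PySem.List.pyGetD current col 0)
          (PySem.List.pyRange 0 n).foldl (fun bm row =>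
            if (row != PySem.List.pyGetD current col 0) then
              let cand := base + pv_deg current col row
              (match bm.1 with
               | none => some (cand, col, row)
               | some b => if cand < b.1 then some (cand, col, row) else some b, bm.2 + 1)
            else bm) bm) ((none : Option (Int × Int × Int)), (0 : Int))
      let search_cost := search_cost + r.2
      match r.1 with
      | none => (none, search_cost)  -- unreachable when cc ≠ 0
      | some b =>
        if b.1 ≥ cc then (none, search_cost)
        else hcb_go fuel (current.set b.2.1.toNat b.2.2) search_cost

def hill_climbing_steepest_ascent_alt (initial_state : List Int) : Option (List Int) × Int :=
  hcb_go ((pv_total initial_state).toNat + 1) initial_state 0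

-- ===== PRECONDITION & SPEC =====
def Spec_hill_climbing_steepest_ascent (initial_state : List Int) (out : Option (List Int) × Int) : Prop := out = hill_climbing_steepest_ascent_alt initial_state
instance (initial_state : List Int) (out : Option (List Int) × Int) : Decidable (Spec_hill_climbing_steepest_ascent initial_state out) := by unfold Spec_hill_climbing_steepest_ascent; infer_instance

-- ===== CLAIM (what is proved, stated in full; the proofs are below) =====
def Claim_equal_hill_climbing_steepest_ascent : Prop := ∀ (initial_state : List Int), Dom_hill_climbing_steepest_ascent initial_state → Spec_hill_climbing_steepest_ascent initial_state (hill_climbing_steepest_ascent initial_state)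

-- ===== LEMMAS AND PROOFS =====

theorem pyRange_eq_nil {a b : Int} (h : b ≤ a) : PySem.List.pyRange a b = [] := by
  simp [PySem.List.pyRange]; omega
theorem sum_map_pyRange (f : Int → Int) (a b : Int) :
    ((PySem.List.pyRange a b).map f).sum = ∑ j ∈ Finset.Ico a b, f j := by
  by_cases h : a < b
  · rw [PySem.List.pyRange_one_cons h, ← Finset.insert_Ico_add_one_left_eq_Ico h,
      Finset.sum_insert (by simp)]
    simp [sum_map_pyRange f (a+1) b]
  · rw [pyRange_eq_nil (by omega), Finset.Ico_eq_empty (by omega)]; simp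
termination_by (b - a).toNat
decreasing_by omega
def pvIB (b : Bool) : Int := if b then 1 else 0
theorem countP_pyRange (p : Int → Bool) (a b : Int) :
    ((List.countP p (PySem.List.pyRange a b) : Nat) : Int) = ∑ j ∈ Finset.Ico a b, pvIB (p j) := by
  rw [← PySem.List.sum_map_ite_one_zero p, sum_map_pyRange (fun x => if p x then 1 else 0) a b]
  rfl
def pvG (s : List Int) (i : Int) : Int := PySem.List.pyGetD s i 0
def pvAtk (v w c j : Int) : Bool := v == w || (v - w).natAbs == (c - j).natAbs
noncomputable def pvConfSum (s : List Int) : Int :=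
  ∑ c ∈ Finset.Ico 0 (s.length : Int), ∑ o ∈ Finset.Ico (c + 1) (s.length : Int),
    pvIB (pvAtk (pvG s c) (pvG s o) c o)
theorem conf_eq (s : List Int) : compute_conflicts s = pvConfSum s := by
  unfold compute_conflicts pvConfSum
  have hin : ∀ (col acc : Int),
      (PySem.List.pyRange (col + 1) (s.length : Int)).foldl (fun conflicts other_col =>
        if (PySem.List.pyGetD s col 0 == PySem.List.pyGetD s other_col 0 ||
            (PySem.List.pyGetD s col 0 - PySem.List.pyGetD s other_col 0).natAbs ==
              (col - other_col).natAbs)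
        then conflicts + 1 else conflicts) acc
      = acc + ∑ o ∈ Finset.Ico (col + 1) (s.length : Int), pvIB (pvAtk (pvG s col) (pvG s o) col o) := by
    intro col acc
    rw [PySem.List.foldl_count_if, countP_pyRange]
    rfl
  simp only [hin]
  rw [PySem.List.foldl_add, sum_map_pyRange]
  simp
noncomputable def pvDegSum (s : List Int) (c v : Int) : Int :=
  ∑ j ∈ Finset.Ico 0 (s.length : Int), if j = c then 0 else pvIB (pvAtk v (pvG s j) c j)
theorem deg_eq (s : List Int) (c v : Int) : pv_deg s c v = pvDegSum s c v := by
  unfold pv_deg pvDegSum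
  rw [PySem.List.foldl_count_if, countP_pyRange]
  rw [zero_add]
  refine Finset.sum_congr rfl (fun j _ => ?_)
  by_cases h : j = c <;> simp [h, pvIB, pvAtk, pvG]
theorem atk_symm (v w c j : Int) : pvAtk v w c j = pvAtk w v j c := by
  unfold pvAtk
  rw [show (v - w).natAbs = (w - v).natAbs by omega,
      show (c - j).natAbs = (j - c).natAbs by omega]
  have : (v == w) = (w == v) := by simp [eq_comm]
  rw [this]
noncomputable def pvOff (s : List Int) (c : Int) : Int :=
  ∑ x ∈ Finset.Ico 0 (s.length : Int), ∑ o ∈ Finset.Ico (x + 1) (s.length : Int),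
    if x = c ∨ o = c then 0 else pvIB (pvAtk (pvG s x) (pvG s o) x o)
theorem conf_split (s : List Int) (c : Int) (h0 : 0 ≤ c) (h1 : c < (s.length : Int)) :
    pvConfSum s = pvOff s c + pvDegSum s c (pvG s c) := by
  have key : ∀ x ∈ Finset.Ico 0 (s.length : Int), ∀ o ∈ Finset.Ico (x + 1) (s.length : Int),
      pvIB (pvAtk (pvG s x) (pvG s o) x o) =
        (if x = c ∨ o = c then 0 else pvIB (pvAtk (pvG s x) (pvG s o) x o))
        + ((if x = c then pvIB (pvAtk (pvG s x) (pvG s o) x o) else 0)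
        + (if o = c then pvIB (pvAtk (pvG s x) (pvG s o) x o) else 0)) := by
    intro x hx o ho
    simp only [Finset.mem_Ico] at hx ho
    by_cases hxc : x = c <;> by_cases hoc : o = c <;> simp [hxc, hoc] <;> omega
  have step1 : pvConfSum s =
      pvOff s c
      + ((∑ x ∈ Finset.Ico 0 (s.length : Int), if x = c then
            ∑ o ∈ Finset.Ico (x + 1) (s.length : Int), pvIB (pvAtk (pvG s x) (pvG s o) x o) else 0)
      + (∑ x ∈ Finset.Ico 0 (s.length : Int), ∑ o ∈ Finset.Ico (x + 1) (s.length : Int),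
            if o = c then pvIB (pvAtk (pvG s x) (pvG s o) x o) else 0)) := by
    unfold pvConfSum pvOff
    rw [Finset.sum_congr rfl (fun x hx => Finset.sum_congr rfl (fun o ho => key x hx o ho))]
    rw [Finset.sum_congr rfl (fun x _ => Finset.sum_add_distrib),
        Finset.sum_congr rfl (fun x _ => congrArg (_ + ·) Finset.sum_add_distrib)]
    rw [Finset.sum_add_distrib, Finset.sum_add_distrib]
    congr 1
    congr 1
    refine Finset.sum_congr rfl (fun x _ => ?_)
    split <;> simp
  have hB : (∑ x ∈ Finset.Ico 0 (s.length : Int), if x = c then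
        ∑ o ∈ Finset.Ico (x + 1) (s.length : Int), pvIB (pvAtk (pvG s x) (pvG s o) x o) else 0)
      = ∑ o ∈ Finset.Ico (c + 1) (s.length : Int), pvIB (pvAtk (pvG s c) (pvG s o) c o) := by
    rw [Finset.sum_ite_eq' (Finset.Ico 0 (s.length : Int)) c]
    simp [Finset.mem_Ico, h0, h1]
  have hC : (∑ x ∈ Finset.Ico 0 (s.length : Int), ∑ o ∈ Finset.Ico (x + 1) (s.length : Int),
        if o = c then pvIB (pvAtk (pvG s x) (pvG s o) x o) else 0)
      = ∑ x ∈ Finset.Ico 0 c, pvIB (pvAtk (pvG s x) (pvG s c) x c) := by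
    rw [Finset.sum_congr rfl (fun x _ => Finset.sum_ite_eq' (Finset.Ico (x + 1) (s.length : Int)) c
      (fun o => pvIB (pvAtk (pvG s x) (pvG s o) x o)))]
    rw [Finset.sum_congr rfl (fun x _ => by
      simp only [Finset.mem_Ico]
      rfl)]
    rw [Finset.sum_congr rfl (fun x _ => show (if x + 1 ≤ c ∧ c < (s.length : Int) then pvIB (pvAtk (pvG s x) (pvG s c) x c) else 0)
        = if x < c then pvIB (pvAtk (pvG s x) (pvG s c) x c) else 0 by
      by_cases h : x < c <;> simp [h] <;> omega)]
    rw [← Finset.sum_filter]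
    congr 1
    ext x
    simp [Finset.mem_Ico]
    omega
  have hD : pvDegSum s c (pvG s c) =
      (∑ x ∈ Finset.Ico 0 c, pvIB (pvAtk (pvG s x) (pvG s c) x c))
      + ∑ o ∈ Finset.Ico (c + 1) (s.length : Int), pvIB (pvAtk (pvG s c) (pvG s o) c o) := by
    unfold pvDegSum
    rw [← Finset.Ico_union_Ico_eq_Ico h0 (le_of_lt h1),
        Finset.sum_union (Finset.Ico_disjoint_Ico_consecutive 0 c (s.length : Int))]
    congr 1
    · refine Finset.sum_congr rfl (fun j hj => ?_)
      simp only [Finset.mem_Ico] at hj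
      rw [if_neg (by omega), atk_symm]
    · rw [← Finset.insert_Ico_add_one_left_eq_Ico h1, Finset.sum_insert (by simp)]
      rw [if_pos rfl, zero_add]
      refine Finset.sum_congr rfl (fun j hj => ?_)
      simp only [Finset.mem_Ico] at hj
      rw [if_neg (by omega)]
  rw [step1, hB, hC, hD]
  ring
theorem pvG_set_ne (s : List Int) (c r j : Int) (hc : 0 ≤ c) (h0 : 0 ≤ j) (h1 : j < (s.length : Int))
    (hne : j ≠ c) : pvG (s.set c.toNat r) j = pvG s j := by
  unfold pvG
  rw [PySem.List.pyGetD_eq_getElem _ _ h0 (by simpa using h1),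
      PySem.List.pyGetD_eq_getElem _ _ h0 h1]
  rw [List.getElem_set]
  split
  · omega
  · rfl
theorem pvG_set_self (s : List Int) (c r : Int) (h0 : 0 ≤ c) (h1 : c < (s.length : Int)) :
    pvG (s.set c.toNat r) c = r := by
  unfold pvG
  rw [PySem.List.pyGetD_eq_getElem _ _ h0 (by simpa using h1)]
  rw [List.getElem_set]
  split
  · rfl
  · omega
theorem off_set (s : List Int) (c r : Int) (hc : 0 ≤ c) : pvOff (s.set c.toNat r) c = pvOff s c := by
  unfold pvOff
  rw [List.length_set]
  refine Finset.sum_congr rfl (fun x hx => Finset.sum_congr rfl (fun o ho => ?_))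
  simp only [Finset.mem_Ico] at hx ho
  by_cases h : x = c ∨ o = c
  · simp [h]
  · push_neg at h
    rw [if_neg (by tauto), if_neg (by tauto),
        pvG_set_ne s c r x hc (by omega) (by omega) h.1,
        pvG_set_ne s c r o hc (by omega) (by omega) h.2]
theorem degSum_set (s : List Int) (c r v : Int) (hc : 0 ≤ c) :
    pvDegSum (s.set c.toNat r) c v = pvDegSum s c v := by
  unfold pvDegSum
  rw [List.length_set]
  refine Finset.sum_congr rfl (fun j hj => ?_)
  simp only [Finset.mem_Ico] at hj
  by_cases h : j = c
  · simp [h]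
  · rw [if_neg h, if_neg h, pvG_set_ne s c r j hc (by omega) (by omega) h]
theorem conf_delta (s : List Int) (c r : Int) (h0 : 0 ≤ c) (h1 : c < (s.length : Int)) :
    compute_conflicts (s.set c.toNat r) =
      compute_conflicts s - pv_deg s c (pvG s c) + pv_deg s c r := by
  have hlen : ((s.set c.toNat r).length : Int) = (s.length : Int) := by simp
  rw [conf_eq, conf_eq, deg_eq, deg_eq,
      conf_split (s.set c.toNat r) c h0 (by omega),
      conf_split s c h0 h1,
      off_set s c r h0, degSum_set s c r (pvG (s.set c.toNat r) c) h0, pvG_set_self s c r h0 h1]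
  ring
def pvPairs (s : List Int) : List (Int × Int) :=
  (PySem.List.pyRange 0 s.length).flatMap (fun col =>
    ((PySem.List.pyRange 0 s.length).filter (fun row => pvG s col != row)).map (fun row => (col, row)))
theorem mem_pvPairs {s : List Int} {p : Int × Int} (h : p ∈ pvPairs s) :
    0 ≤ p.1 ∧ p.1 < (s.length : Int) ∧ 0 ≤ p.2 ∧ p.2 < (s.length : Int) := by
  unfold pvPairs at h
  simp only [List.mem_flatMap, List.mem_map, List.mem_filter] at h
  obtain ⟨col, hcol, row, ⟨hrow, _⟩, rfl⟩ := h
  rw [PySem.List.mem_pyRange_one] at hcol hrow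
  exact ⟨hcol.1, hcol.2, hrow.1, hrow.2⟩
theorem succ_eq (s : List Int) :
    get_successors s = (pvPairs s).map (fun p => s.set p.1.toNat p.2) := by
  unfold get_successors pvPairs
  have hin : ∀ (col : Int) (acc : List (List Int)),
      (PySem.List.pyRange 0 (s.length : Int)).foldl (fun successors row =>
        if (PySem.List.pyGetD s col 0 != row)
        then successors ++ [s.set col.toNat row] else successors) acc
      = acc ++ ((PySem.List.pyRange 0 (s.length : Int)).filter (fun row => pvG s col != row)).map
          (fun row => s.set col.toNat row) := by
    intro col acc
    exact PySem.List.foldl_append_if (fun row => pvG s col != row) (fun row => s.set col.toNat row) _ acc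
  simp only [hin]
  rw [PySem.List.foldl_append_eq_flatMap]
  simp [List.map_flatMap, List.map_map, Function.comp_def]
theorem min?_map {α β : Type} (f : α → β) (k : β → Int) (l : List α) :
    PySem.List.min? (l.map f) k = Option.map f (PySem.List.min? l (fun a => k (f a))) := by
  unfold PySem.List.min?
  suffices h : ∀ (acc : Option α),
      (l.map f).foldl (fun acc x => match acc with
        | none => some x
        | some m => if k x < k m then some x else some m) (Option.map f acc)
      = Option.map f (l.foldl (fun acc x => match acc with
        | none => some x
        | some m => if k (f x) < k (f m) then some x else some m) acc) by
    exact h none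
  induction l with
  | nil => intro acc; rfl
  | cons x t ih =>
    intro acc
    rw [List.map_cons, List.foldl_cons, List.foldl_cons]
    cases acc with
    | none => exact ih (some x)
    | some m =>
      by_cases h : k (f x) < k (f m)
      · simpa [h] using ih (some x)
      · simpa [h] using ih (some m)
theorem cast_sum_nat {α : Type} (g : α → Nat) (l : List α) :
    (((l.map g).sum : Nat) : Int) = (l.map (fun x => ((g x : Nat) : Int))).sum := by
  induction l with
  | nil => rfl
  | cons h t ih => simp only [List.map_cons, List.sum_cons, Nat.cast_add, ih]
theorem cast_length_pvPairs (s : List Int) :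
    ((pvPairs s).length : Int) =
      ∑ c ∈ Finset.Ico 0 (s.length : Int),
        ((List.countP (fun row => pvG s c != row) (PySem.List.pyRange 0 (s.length : Int)) : Nat) : Int) := by
  unfold pvPairs
  rw [List.length_flatMap]
  simp only [List.length_map, ← List.countP_eq_length_filter]
  rw [cast_sum_nat, sum_map_pyRange]
def pvBIn (cur : List Int) (cc col : Int) : Option (Int × Int × Int) → Int → Option (Int × Int × Int) :=
  fun b row =>
    if (row != PySem.List.pyGetD cur col 0) then
      (match b with
       | none => some (cc - pv_deg cur col (PySem.List.pyGetD cur col 0) + pv_deg cur col row, col, row)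
       | some bb => if cc - pv_deg cur col (PySem.List.pyGetD cur col 0) + pv_deg cur col row < bb.1
          then some (cc - pv_deg cur col (PySem.List.pyGetD cur col 0) + pv_deg cur col row, col, row)
          else some bb)
    else b
def pvCIn (cur : List Int) (col : Int) : Int → Int → Int :=
  fun m row => if (row != PySem.List.pyGetD cur col 0) then m + 1 else m
theorem B_fold_eq (cur : List Int) (cc : Int) :
    ((PySem.List.pyRange 0 (cur.length : Int)).foldl (fun bm col =>
      let base := cc - pv_deg cur col (PySem.List.pyGetD cur col 0)
      (PySem.List.pyRange 0 (cur.length : Int)).foldl (fun bm row =>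
        if (row != PySem.List.pyGetD cur col 0) then
          let cand := base + pv_deg cur col row
          (match bm.1 with
           | none => some (cand, col, row)
           | some b => if cand < b.1 then some (cand, col, row) else some b, bm.2 + 1)
        else bm) bm) ((none : Option (Int × Int × Int)), (0 : Int)))
    = (PySem.List.min? ((pvPairs cur).map (fun p =>
          (cc - pv_deg cur p.1 (pvG cur p.1) + pv_deg cur p.1 p.2, p.1, p.2))) (fun x => x.1),
       ((pvPairs cur).length : Int)) := by
  have hsplit : ∀ (col : Int) (bm : Option (Int × Int × Int) × Int),
      ((PySem.List.pyRange 0 (cur.length : Int)).foldl (fun bm row =>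
        if (row != PySem.List.pyGetD cur col 0) then
          let cand := cc - pv_deg cur col (PySem.List.pyGetD cur col 0) + pv_deg cur col row
          (match bm.1 with
           | none => some (cand, col, row)
           | some b => if cand < b.1 then some (cand, col, row) else some b, bm.2 + 1)
        else bm) bm)
      = ((PySem.List.pyRange 0 (cur.length : Int)).foldl (pvBIn cur cc col) bm.1,
         (PySem.List.pyRange 0 (cur.length : Int)).foldl (pvCIn cur col) bm.2) := by
    intro col bm
    rw [show (fun (bm : Option (Int × Int × Int) × Int) (row : Int) =>
        if (row != PySem.List.pyGetD cur col 0) then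
          let cand := cc - pv_deg cur col (PySem.List.pyGetD cur col 0) + pv_deg cur col row
          ((match bm.1 with
           | none => some (cand, col, row)
           | some b => if cand < b.1 then some (cand, col, row) else some b), bm.2 + 1)
        else bm)
      = (fun (bm : Option (Int × Int × Int) × Int) (row : Int) =>
          (pvBIn cur cc col bm.1 row, pvCIn cur col bm.2 row)) from
      funext fun bm => funext fun row => by
        unfold pvBIn pvCIn
        by_cases h : (row != PySem.List.pyGetD cur col 0) <;>
          simp only [h, if_true, if_false, Bool.false_eq_true]]
    obtain ⟨b0, m0⟩ := bm
    exact PySem.List.foldl_prod_mk (pvBIn cur cc col) (pvCIn cur col)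
      (PySem.List.pyRange 0 (cur.length : Int)) b0 m0
  rw [show (fun (bm : Option (Int × Int × Int) × Int) (col : Int) =>
      let base := cc - pv_deg cur col (PySem.List.pyGetD cur col 0)
      (PySem.List.pyRange 0 (cur.length : Int)).foldl (fun bm row =>
        if (row != PySem.List.pyGetD cur col 0) then
          let cand := base + pv_deg cur col row
          (match bm.1 with
           | none => some (cand, col, row)
           | some b => if cand < b.1 then some (cand, col, row) else some b, bm.2 + 1)
        else bm) bm)
    = (fun (bm : Option (Int × Int × Int) × Int) (col : Int) =>
        ((fun (b : Option (Int × Int × Int)) (col : Int) =>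
            (PySem.List.pyRange 0 (cur.length : Int)).foldl (pvBIn cur cc col) b) bm.1 col,
         (fun (m : Int) (col : Int) =>
            (PySem.List.pyRange 0 (cur.length : Int)).foldl (pvCIn cur col) m) bm.2 col)) from
    funext fun bm => funext fun col => hsplit col bm]
  rw [PySem.List.foldl_prod_mk
    (fun (b : Option (Int × Int × Int)) (col : Int) =>
      (PySem.List.pyRange 0 (cur.length : Int)).foldl (pvBIn cur cc col) b)
    (fun (m : Int) (col : Int) =>
      (PySem.List.pyRange 0 (cur.length : Int)).foldl (pvCIn cur col) m)
    (PySem.List.pyRange 0 (cur.length : Int)) none 0]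
  have hcount : (PySem.List.pyRange 0 (cur.length : Int)).foldl
      (fun (m : Int) (col : Int) => (PySem.List.pyRange 0 (cur.length : Int)).foldl (pvCIn cur col) m) 0
      = ((pvPairs cur).length : Int) := by
    unfold pvCIn
    simp only [PySem.List.foldl_count_if]
    rw [PySem.List.foldl_add]
    rw [sum_map_pyRange (fun col => ((List.countP (fun row => row != PySem.List.pyGetD cur col 0)
        (PySem.List.pyRange 0 (cur.length : Int)) : Nat) : Int)) 0 (cur.length : Int)]
    rw [cast_length_pvPairs, zero_add]
    apply Finset.sum_congr rfl
    intro c _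
    congr 1
    apply List.countP_congr
    intro row _
    simp only [pvG]
    constructor <;> (intro h ; simpa [bne_comm] using h)
  have hbest : (PySem.List.pyRange 0 (cur.length : Int)).foldl
      (fun (b : Option (Int × Int × Int)) (col : Int) =>
        (PySem.List.pyRange 0 (cur.length : Int)).foldl (pvBIn cur cc col) b) none
      = PySem.List.min? ((pvPairs cur).map (fun p =>
          (cc - pv_deg cur p.1 (pvG cur p.1) + pv_deg cur p.1 p.2, p.1, p.2))) (fun x => x.1) := by
    unfold PySem.List.min? pvPairs
    rw [List.foldl_map, List.foldl_flatMap]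
    refine (PySem.List.foldl_congr_mem _ _ _ _ ?_).symm
    intro acc col _
    rw [List.foldl_map, List.foldl_filter]
    apply PySem.List.foldl_congr_mem
    intro b row _
    unfold pvBIn
    by_cases h : (pvG cur col != row)
    · rw [if_pos h, if_pos (by simpa [bne_comm] using h)]
      cases b <;> rfl
    · rw [if_neg h, if_neg (by simp at h ⊢; simpa [eq_comm] using h)]
  rw [hcount, hbest]
theorem hca_eq_hcb : ∀ (fuel : Nat) (current : List Int) (sc : Int),
    hca_go fuel current sc = hcb_go fuel current sc := by
  intro fuel
  induction fuel with
  | zero => intro cur sc; rfl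
  | succ fuel ih =>
    intro cur sc
    simp only [hca_go, hcb_go]
    rw [show pv_total cur = compute_conflicts cur from rfl]
    by_cases h0 : compute_conflicts cur = 0
    · rw [if_pos h0, if_pos h0]
    · rw [if_neg h0, if_neg h0, B_fold_eq cur (compute_conflicts cur), succ_eq cur, List.map_map]
      have hmap : (pvPairs cur).map (fun p =>
            (compute_conflicts cur - pv_deg cur p.1 (pvG cur p.1) + pv_deg cur p.1 p.2, p.1, p.2))
          = (pvPairs cur).map (fun p => (compute_conflicts (cur.set p.1.toNat p.2), p.1, p.2)) := by
        refine List.map_congr_left (fun p hp => ?_)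
        obtain ⟨ha, hb, hc, hd⟩ := mem_pvPairs hp
        rw [conf_delta cur p.1 p.2 ha hb]
      rw [hmap]
      have hA : ((fun s => (compute_conflicts s, s)) ∘ (fun p : Int × Int => cur.set p.1.toNat p.2))
          = fun p : Int × Int => (compute_conflicts (cur.set p.1.toNat p.2), cur.set p.1.toNat p.2) := rfl
      rw [hA]
      rw [min?_map (fun p : Int × Int => (compute_conflicts (cur.set p.1.toNat p.2), cur.set p.1.toNat p.2))
          (fun x => x.1) (pvPairs cur)]
      rw [min?_map (fun p : Int × Int => (compute_conflicts (cur.set p.1.toNat p.2), p.1, p.2))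
          (fun x => x.1) (pvPairs cur)]
      rw [show (fun a : Int × Int =>
            (fun x : Int × List Int => x.1) ((fun p : Int × Int => (compute_conflicts (cur.set p.1.toNat p.2), cur.set p.1.toNat p.2)) a))
          = (fun a : Int × Int =>
            (fun x : Int × Int × Int => x.1) ((fun p : Int × Int => (compute_conflicts (cur.set p.1.toNat p.2), p.1, p.2)) a)) from rfl]
      set m := PySem.List.min? (pvPairs cur) (fun a : Int × Int =>
            (fun x : Int × Int × Int => x.1) ((fun p : Int × Int => (compute_conflicts (cur.set p.1.toNat p.2), p.1, p.2)) a)) with hm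
      cases m with
      | none => simp [List.length_map]
      | some p =>
        simp only [Option.map_some, List.length_map]
        by_cases hge : compute_conflicts (cur.set p.1.toNat p.2) ≥ compute_conflicts cur
        · rw [if_pos hge, if_pos hge]
        · rw [if_neg hge, if_neg hge]
          exact ih _ _

-- ===== VERDICT (by name: the statement is the Claim_ definition above) =====
theorem hill_climbing_steepest_ascent_spec : Claim_equal_hill_climbing_steepest_ascent := by
  intro s _
  unfold Spec_hill_climbing_steepest_ascent hill_climbing_steepest_ascent hill_climbing_steepest_ascent_alt
  rw [show pv_total = compute_conflicts from rfl, hca_eq_hcb]
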